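-- pv_equiv track=rewrite | github.com/gratianlup/MarkovTextGenerator | generate_markov_text.py | compute_ngram_counts
-- ===== SOURCE A (Python) =====
-- def compute_ngram_counts(text, k):
--     ngrams = {}
--     text_length = len(text)
--
--     if text_length < k:
--         # Text is too short to extract anything useful.
--         raise Exception("Text is too short. Provide more than {0} characters".format(k))
--
--     for i in range(0, text_length):
--         # Extract the n-gram from positions [i, i + k).
--         # If it extends beyond the text, letters from the beginning are taken.
--         if i + k < text_length:
--             ngram = text[i : i + k]
--         else:
--             ngram = text[i : text_length] + \
--                     text[0 : (k - (text_length - i))]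
--
--         # Look at the letter following the n-gram and increase the count
--         # associated with it. If it is the first time it is seen, the count is 1.
--         next_letter = text[i + k] if i + k < text_length else \
--                       text[k - (text_length - i)]
--
--         # The letters following a n-gram are stored as a dictionary of
--         # (letter : occurrence_count) pairs.
--         if not ngram in ngrams:
--             ngrams[ngram] = {}
--
--         next_ngram_letters = ngrams[ngram]
--
--         if next_letter in next_ngram_letters:
--             next_ngram_letters[next_letter] += 1
--         else:
--             next_ngram_letters[next_letter] = 1
--
--     return ngrams
-- ===== SOURCE B (Python) =====
-- def _first_seen(items):
--     return list(dict.fromkeys(items))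
--
--
-- def compute_ngram_counts(text, k):
--     if len(text) < k:
--         raise Exception("Text is too short. Provide more than {0} characters".format(k))
--
--     # Pass 1: group, per n-gram of the wrapped buffer, the LIST of follower
--     # letters of all its occurrences, in occurrence order (no counting here).
--     extended = text + text[:k]
--     followers = {}
--     for i in range(len(text)):
--         followers.setdefault(extended[i:i + k], []).append(extended[i + k])
--
--     # Pass 2: tally each follower list: keys in first-seen order, value = multiplicity.
--     return {ngram: {letter: letters.count(letter) for letter in _first_seen(letters)}
--             for ngram, letters in followers.items()}
-- ===== Notes on version B (the rewrite author's own statement) =====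
-- stated objective: alternative
-- what changed: B splits A's single streaming nested-counter loop into two stages: pass 1 groups the follower letters of each n-gram (over a wrapped buffer text+text[:k], no wraparound branches) into lists via setdefault/append, pass 2 tallies each list with first-seen dedup and list.count, instead of A's per-iteration branchy slicing and increment of a nested count dict.
-- outside the precondition, e.g. on compute_ngram_counts('ab', -1): A returns {'a': {'b': 1}, '': {'a': 1}}, B returns {'ab': {'a': 1}, '': {'a': 1}}
import Mathlib
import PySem

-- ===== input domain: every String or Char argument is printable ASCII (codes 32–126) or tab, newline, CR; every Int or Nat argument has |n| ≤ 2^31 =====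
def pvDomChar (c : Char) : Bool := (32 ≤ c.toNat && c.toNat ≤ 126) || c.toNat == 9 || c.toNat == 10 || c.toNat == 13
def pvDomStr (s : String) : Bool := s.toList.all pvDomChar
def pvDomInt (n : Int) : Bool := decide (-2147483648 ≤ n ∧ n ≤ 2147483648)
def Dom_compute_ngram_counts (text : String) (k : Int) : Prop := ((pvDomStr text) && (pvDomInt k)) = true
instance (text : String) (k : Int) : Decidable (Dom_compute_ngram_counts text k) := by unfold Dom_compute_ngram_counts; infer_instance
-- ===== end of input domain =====

-- B replaces A's streaming nested-counter update by two stages: pass 1 groups the follower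
-- letters of each n-gram (over a wrapped buffer) into LISTS, pass 2 tallies each list by
-- first-seen order and list.count (alternative decomposition, same cost).


abbrev pvInner := PySem.Dict (List Char) Int
abbrev pvOuter := PySem.Dict (List Char) pvInner
-- text[j] is a 1-character string in Python; ported as a singleton char list ([] only out of range)
def pvChar1 (cs : List Char) (j : Int) : List Char :=
  match PySem.List.pyGet? cs j with
  | some c => [c]
  | none => []

-- ===== PORT A =====
-- one iteration of A's loop body
def pvAStep (cs : List Char) (n k : Int) (d : pvOuter) (i : Int) : pvOuter :=
  let ngram := if i + k < n then PySem.List.slice cs (some i) (some (i + k))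
               else PySem.List.slice cs (some i) (some n) ++
                    PySem.List.slice cs (some 0) (some (k - (n - i)))
  let next_letter := if i + k < n then pvChar1 cs (i + k) else pvChar1 cs (k - (n - i))
  let d := if d.contains ngram then d else d.insert ngram PySem.Dict.empty
  let inner := d.getD ngram PySem.Dict.empty
  let inner' := if inner.contains next_letter
                then inner.insert next_letter (inner.getD next_letter 0 + 1)
                else inner.insert next_letter 1
  d.insert ngram inner'

def compute_ngram_counts (text : String) (k : Int) : List (String × List (String × Int)) :=
  let cs := text.toList
  let n : Int := cs.length
  if n < k then []  -- Python raises here; excluded by Pre_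
  else
    let d := (PySem.List.pyRange 0 n 1).foldl (pvAStep cs n k) PySem.Dict.empty
    d.items.map (fun p => (String.ofList p.1, p.2.items.map (fun q => (String.ofList q.1, q.2))))

-- ===== PORT B =====
def compute_ngram_counts_alt (text : String) (k : Int) : List (String × List (String × Int)) :=
  let cs := text.toList
  let n : Int := cs.length
  if n < k then []  -- Source B raises here; excluded by Pre_
  else
    let ext := cs ++ PySem.List.slice cs none (some k)
    -- pass 1: followers.setdefault(gram, []).append(letter)  =  modify gram [] (· ++ [letter])
    let followers : PySem.Dict (List Char) (List (List Char)) :=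
      (PySem.List.pyRange 0 n 1).foldl (fun d i =>
        d.modify (PySem.List.slice ext (some i) (some (i + k))) []
          (· ++ [pvChar1 ext (i + k)])) PySem.Dict.empty
    -- pass 2: dict comprehension over distinct keys; _first_seen = list(dict.fromkeys(·)) = PySem.List.dedup
    followers.items.map (fun p =>
      (String.ofList p.1,
       (PySem.List.dedup p.2).map (fun l => (String.ofList l, (p.2.count l : Int)))))

-- ===== PRECONDITION & SPEC =====
-- Pre_ excludes len(text) < k, where A raises, and k < 0 (a negative n-gram length is outside the
-- function's natural domain; A's value there is a negative-index slicing artefact B does not reproduce).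
def Pre_compute_ngram_counts (text : String) (k : Int) : Prop :=
  0 ≤ k ∧ k ≤ (text.toList.length : Int)
instance (text : String) (k : Int) : Decidable (Pre_compute_ngram_counts text k) := by
  unfold Pre_compute_ngram_counts; infer_instance

def pvWitness_compute_ngram_counts : String × Int := ("abracadabra", 2)

def Spec_compute_ngram_counts (text : String) (k : Int) (out : List (String × List (String × Int))) : Prop := out = compute_ngram_counts_alt text k
instance (text : String) (k : Int) (out : List (String × List (String × Int))) : Decidable (Spec_compute_ngram_counts text k out) := by unfold Spec_compute_ngram_counts; infer_instance

-- ===== CLAIM (what is proved, stated in full; the proofs are below) =====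
def Claim_equal_compute_ngram_counts : Prop := ∀ (text : String) (k : Int), Dom_compute_ngram_counts text k → Pre_compute_ngram_counts text k → Spec_compute_ngram_counts text k (compute_ngram_counts text k)

-- ===== LEMMAS AND PROOFS =====

abbrev pvP := (List Char) × (List Char)

-- the value A's loop body inserts at key p.1
def pvVal (d : pvOuter) (p : pvP) : pvInner :=
  (d.getD p.1 PySem.Dict.empty).insert p.2 ((d.getD p.1 PySem.Dict.empty).getD p.2 0 + 1)

-- canonical form of A's loop body
def pvAStepC (d : pvOuter) (p : pvP) : pvOuter := d.insert p.1 (pvVal d p)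

-- B's pass-1 loop body, on a precomputed pair
def pvBStepD (d : PySem.Dict (List Char) (List (List Char))) (p : pvP) :
    PySem.Dict (List Char) (List (List Char)) :=
  d.modify p.1 [] (· ++ [p.2])

def pvPairA (cs : List Char) (n k : Int) (i : Int) : pvP :=
  (if i + k < n then PySem.List.slice cs (some i) (some (i + k))
   else PySem.List.slice cs (some i) (some n) ++ PySem.List.slice cs (some 0) (some (k - (n - i))),
   if i + k < n then pvChar1 cs (i + k) else pvChar1 cs (k - (n - i)))

def pvPairB (cs : List Char) (k : Int) (i : Int) : pvP :=
  let ext := cs ++ PySem.List.slice cs none (some k)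
  (PySem.List.slice ext (some i) (some (i + k)), pvChar1 ext (i + k))

theorem pvAStep_aux (d : pvOuter) (gr l : List Char) :
    (let d' := if d.contains gr then d else d.insert gr PySem.Dict.empty
     let inner := d'.getD gr PySem.Dict.empty
     let inner' := if inner.contains l then inner.insert l (inner.getD l 0 + 1)
                   else inner.insert l 1
     d'.insert gr inner') = pvAStepC d (gr, l) := by
  simp only [pvAStepC, pvVal]
  by_cases hc : d.contains gr
  · simp only [hc, if_true]
    by_cases hl : (d.getD gr PySem.Dict.empty).contains l
    · simp [hl]
    · simp only [hl, if_false, Bool.false_eq_true]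
      rw [PySem.Dict.getD_of_not_contains _ (0 : Int) (by simpa using hl)]
      norm_num
  · have hc' : d.contains gr = false := by simpa using hc
    rw [PySem.Dict.getD_of_not_contains _ PySem.Dict.empty hc']
    simp only [hc', if_false, Bool.false_eq_true, PySem.Dict.getD_insert_self,
      PySem.Dict.contains_empty, PySem.Dict.insert_insert_self, PySem.Dict.getD_empty]
    norm_num

theorem pvAStep_eq (cs : List Char) (n k : Int) (d : pvOuter) (i : Int) :
    pvAStep cs n k d i = pvAStepC d (pvPairA cs n k i) := by
  have := pvAStep_aux d
    (if i + k < n then PySem.List.slice cs (some i) (some (i + k))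
     else PySem.List.slice cs (some i) (some n) ++
          PySem.List.slice cs (some 0) (some (k - (n - i))))
    (if i + k < n then pvChar1 cs (i + k) else pvChar1 cs (k - (n - i)))
  simpa only [pvAStep, pvPairA] using this

theorem pvPair_eq (cs : List Char) (k i : Int) (hk0 : 0 ≤ k) (hkn : k ≤ (cs.length : Int))
    (hi0 : 0 ≤ i) (hin : i < (cs.length : Int)) :
    pvPairA cs (cs.length : Int) k i = pvPairB cs k i := by
  lift k to ℕ using hk0 with K
  lift i to ℕ using hi0 with I
  have hKN : K ≤ cs.length := by exact_mod_cast hkn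
  have hIN : I < cs.length := by exact_mod_cast hin
  have hext : PySem.List.slice cs none (some (K : Int)) = cs.take K :=
    PySem.List.slice_to_natCast cs K
  simp only [pvPairA, pvPairB, hext]
  by_cases h : (I : Int) + (K : Int) < (cs.length : Int)
  · have hIK : I + K < cs.length := by exact_mod_cast h
    rw [if_pos h, if_pos h, Prod.mk.injEq]
    refine ⟨?_, ?_⟩
    · rw [show ((I : Int) + (K : Int)) = ((I + K : ℕ) : Int) by push_cast; ring,
          PySem.List.slice_natCast, PySem.List.slice_natCast]
      rw [List.drop_append_of_le_length (by omega)]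
      rw [List.take_append_of_le_length (by simp; omega)]
    · simp only [pvChar1]
      rw [show ((I : Int) + (K : Int)) = ((I + K : ℕ) : Int) by push_cast; ring,
          PySem.List.pyGet?_natCast, PySem.List.pyGet?_natCast,
          List.getElem?_append_left hIK]
  · have hIK : cs.length ≤ I + K := by push_cast at h; omega
    rw [if_neg h, if_neg h, Prod.mk.injEq]
    have hM : ((K : Int) - ((cs.length : Int) - (I : Int))) = ((I + K - cs.length : ℕ) : Int) := by
      omega
    have hcast : ((I : Int) + (K : Int)) = ((I + K : ℕ) : Int) := by push_cast; ring
    have e2 : (cs.drop I).length = cs.length - I := by simp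
    refine ⟨?_, ?_⟩
    · rw [hM, hcast, show ((0:Int)) = ((0:ℕ):Int) by norm_num,
          PySem.List.slice_natCast, PySem.List.slice_natCast, PySem.List.slice_natCast,
          List.drop_zero, Nat.sub_zero, Nat.add_sub_cancel_left,
          List.drop_append, Nat.sub_eq_zero_of_le hIN.le, List.drop_zero, List.take_append,
          List.take_of_length_le (show (List.drop I cs).length ≤ cs.length - I by simp),
          List.take_of_length_le (show (List.drop I cs).length ≤ K by simp; omega),
          List.take_take]
      have hmin : min (K - (List.drop I cs).length) K = I + K - cs.length := by
        rw [e2]; omega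
      rw [hmin]
    · simp only [pvChar1]
      rw [hM, hcast, PySem.List.pyGet?_natCast, PySem.List.pyGet?_natCast,
          List.getElem?_append_right hIK, List.getElem?_take, if_pos (by omega)]

-- A's fold, looked up at one gram, is the counting fold over that gram's follower letters
theorem pvInnerA (L : List pvP) (d : pvOuter) (g : List Char) :
    (L.foldl pvAStepC d).getD g PySem.Dict.empty
      = ((L.filter (fun p => p.1 == g)).map (fun p => p.2)).foldl
          (fun (dd : pvInner) x => dd.insert x (dd.getD x 0 + 1)) (d.getD g PySem.Dict.empty) := by
  induction L generalizing d with
  | nil => rfl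
  | cons p L ih =>
    simp only [List.foldl_cons, List.filter_cons]
    by_cases hg : p.1 = g
    · rw [if_pos (by simpa using hg)]
      simp only [List.map_cons, List.foldl_cons]
      rw [ih]
      simp only [pvAStepC, pvVal, hg, PySem.Dict.getD_insert_self]
    · rw [if_neg (by simpa using hg)]
      rw [ih]
      simp only [pvAStepC]
      rw [PySem.Dict.getD_insert_of_ne _ _ _ (fun e => hg e.symm)]

theorem pvKeysA (L : List pvP) :
    (L.foldl pvAStepC PySem.Dict.empty).keys = PySem.Set.ofList (L.map (fun p => p.1)) := by
  have h := PySem.Dict.keys_foldl_insert_key (ν := pvInner) L (fun p => p.1) pvVal PySem.Dict.empty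
  simpa [PySem.Set.update_nil_left] using h

theorem pvNodupA (L : List pvP) : (L.foldl pvAStepC PySem.Dict.empty).keys.Nodup := by
  have h := PySem.Dict.nodup_keys_foldl_insert_key (ν := pvInner) L (fun p => p.1) pvVal
    PySem.Dict.empty PySem.Dict.nodup_keys_empty
  simpa using h

theorem pvItemsA (L : List pvP) :
    (L.foldl pvAStepC PySem.Dict.empty).items
      = (PySem.Set.ofList (L.map (fun p => p.1))).map
          (fun g => (g, PySem.Dict.counter ((L.filter (fun p => p.1 == g)).map (fun p => p.2)))) := by
  rw [PySem.Dict.items_eq_map_keys _ (pvNodupA L) PySem.Dict.empty, pvKeysA]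
  apply List.map_congr_left
  intro g _
  rw [pvInnerA L PySem.Dict.empty g, PySem.Dict.getD_empty,
      PySem.Dict.foldl_insert_getD_add_one_eq_counter]

theorem pvKeysB (L : List pvP) :
    (L.foldl pvBStepD PySem.Dict.empty).keys = PySem.Set.ofList (L.map (fun p => p.1)) := by
  have h := PySem.Dict.keys_foldl_modify_key L (fun p : pvP => p.1) ([] : List (List Char))
    (fun _ p v => v ++ [p.2]) PySem.Dict.empty
  simpa [PySem.Set.update_nil_left] using h

theorem pvNodupB (L : List pvP) : (L.foldl pvBStepD PySem.Dict.empty).keys.Nodup := by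
  have h := PySem.Dict.nodup_keys_foldl_modify_key L (fun p : pvP => p.1) ([] : List (List Char))
    (fun _ p v => v ++ [p.2]) PySem.Dict.empty PySem.Dict.nodup_keys_empty
  simpa using h

theorem pvItemsB (L : List pvP) :
    (L.foldl pvBStepD PySem.Dict.empty).items
      = (PySem.Set.ofList (L.map (fun p => p.1))).map
          (fun g => (g, (L.filter (fun p => p.1 == g)).map (fun p => p.2))) := by
  rw [PySem.Dict.items_eq_map_keys _ (pvNodupB L) [], pvKeysB]
  apply List.map_congr_left
  intro g _
  have h := PySem.Dict.getD_foldl_modify_append L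
    (PySem.Dict.empty : PySem.Dict (List Char) (List (List Char))) g
  simpa [pvBStepD] using h

-- ===== VERDICT (by name: the statement is the Claim_ definition above) =====
theorem compute_ngram_counts_spec : Claim_equal_compute_ngram_counts := by
  intro text k hdom hpre
  unfold Spec_compute_ngram_counts
  obtain ⟨hk0, hkn⟩ := hpre
  simp only [compute_ngram_counts, compute_ngram_counts_alt]
  rw [if_neg (by omega), if_neg (by omega)]
  have hstepA : pvAStep text.toList (text.toList.length : Int) k
      = fun d i => pvAStepC d (pvPairA text.toList (text.toList.length : Int) k i) :=
    funext fun d => funext fun i => pvAStep_eq _ _ _ d i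
  have hA : (PySem.List.pyRange 0 (text.toList.length : Int) 1).foldl
        (pvAStep text.toList (text.toList.length : Int) k) PySem.Dict.empty
      = ((PySem.List.pyRange 0 (text.toList.length : Int) 1).map
          (pvPairA text.toList (text.toList.length : Int) k)).foldl pvAStepC PySem.Dict.empty := by
    rw [List.foldl_map, hstepA]
  have hpairs : (PySem.List.pyRange 0 (text.toList.length : Int) 1).map
        (pvPairA text.toList (text.toList.length : Int) k)
      = (PySem.List.pyRange 0 (text.toList.length : Int) 1).map (pvPairB text.toList k) := by
    apply List.map_congr_left
    intro i hi
    have hib := PySem.List.mem_pyRange_one.mp hi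
    exact pvPair_eq text.toList k i hk0 hkn hib.1 hib.2
  have hB : (PySem.List.pyRange 0 (text.toList.length : Int) 1).foldl
        (fun (d : PySem.Dict (List Char) (List (List Char))) i =>
          d.modify (PySem.List.slice
              (text.toList ++ PySem.List.slice text.toList none (some k)) (some i) (some (i + k))) []
            (· ++ [pvChar1 (text.toList ++ PySem.List.slice text.toList none (some k)) (i + k)]))
        PySem.Dict.empty
      = ((PySem.List.pyRange 0 (text.toList.length : Int) 1).map
          (pvPairB text.toList k)).foldl pvBStepD PySem.Dict.empty := by
    rw [List.foldl_map]
    rfl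
  rw [hA, hpairs, hB, pvItemsA, pvItemsB]
  simp only [List.map_map]
  apply List.map_congr_left
  intro g _
  simp only [Function.comp]
  rw [PySem.Dict.items_counter]
  rw [show (PySem.List.dedup : List (List Char) → List (List Char)) = PySem.Set.ofList from rfl]
  simp [List.map_map, Function.comp]
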